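-- pv_equiv track=rewrite | github.com/kylasweb/AI-IVR-v2 | ivr-backend/services/speech_to_text_ml.py | _convert_to_malayalam
-- ===== SOURCE A (Python) =====
-- def _convert_to_malayalam(text: str) -> str:
--     """Convert Manglish or English text to proper Malayalam"""
--     text_lower = text.lower().strip()
--
--     # Common Manglish to Malayalam conversions
--     manglish_to_malayalam = {
--         # Greetings
--         'namaskaram': 'നമസ്കാരം',
--         'hai': 'ഹായ്',
--         'sukham': 'സുഖം',
--         'engane irikkunnu': 'എങ്ങനെ ഇരിക്കുന്നു',
--
--         # Help words
--         'sahayam': 'സഹായം',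
--         'help': 'സഹായം',
--         'vendam': 'വേണം',
--
--         # Common words
--         'athe': 'അതെ',
--         'alla': 'അല്ല',
--         'sari': 'ശരി',
--         'undu': 'ഉണ്ട്',
--         'illa': 'ഇല്ല',
--
--         # Business terms
--         'bill': 'ബിൽ',
--         'payment': 'പേയ്‌മെന്റ്',
--         'appointment': 'അപ്പോയിന്റ്മെന്റ്',
--         'technical': 'സാങ്കേതിക',
--         'transfer': 'ട്രാൻസ്ഫർ'
--     }
--
--     # Replace common Manglish patterns
--     for manglish, malayalam in manglish_to_malayalam.items():
--         if manglish in text_lower: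
--             text_lower = text_lower.replace(manglish, malayalam)
--
--     return text_lower
-- ===== SOURCE B (Python) =====
-- def _convert_to_malayalam(text: str) -> str:
--     """Convert Manglish or English text to proper Malayalam"""
--     keys = 'namaskaram|hai|sukham|engane irikkunnu|sahayam|help|vendam|athe|alla|sari|undu|illa|bill|payment|appointment|technical|transfer'.split('|')
--     values = 'നമസ്കാരം|ഹായ്|സുഖം|എങ്ങനെ ഇരിക്കുന്നു|സഹായം|സഹായം|വേണം|അതെ|അല്ല|ശരി|ഉണ്ട്|ഇല്ല|ബിൽ|പേയ്\u200cമെന്റ്|അപ്പോയിന്റ്മെന്റ്|സാങ്കേതിക|ട്രാൻസ്ഫർ'.split('|')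
--
--     def go(pairs, s):
--         # replace keys in priority (dict) order by splitting on the first key
--         # and handling the remaining keys inside each fragment
--         if not pairs:
--             return s
--         (key, value), rest = pairs[0], pairs[1:]
--         return value.join(go(rest, piece) for piece in s.split(key))
--
--     return go(list(zip(keys, values)), text.lower().strip())
-- ===== Notes on version B (the rewrite author's own statement) =====
-- stated objective: alternative
-- what changed: The iterated whole-string membership-test-plus-replace loop over the dict is replaced by a recursion over the key/value pairs (zipped from two '|'-separated tables) that splits the string on the current key and joins the recursively converted fragments with the Malayalam value (values are all non-ASCII and keys all ASCII, so fragment-local processing is exact).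
import Mathlib
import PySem

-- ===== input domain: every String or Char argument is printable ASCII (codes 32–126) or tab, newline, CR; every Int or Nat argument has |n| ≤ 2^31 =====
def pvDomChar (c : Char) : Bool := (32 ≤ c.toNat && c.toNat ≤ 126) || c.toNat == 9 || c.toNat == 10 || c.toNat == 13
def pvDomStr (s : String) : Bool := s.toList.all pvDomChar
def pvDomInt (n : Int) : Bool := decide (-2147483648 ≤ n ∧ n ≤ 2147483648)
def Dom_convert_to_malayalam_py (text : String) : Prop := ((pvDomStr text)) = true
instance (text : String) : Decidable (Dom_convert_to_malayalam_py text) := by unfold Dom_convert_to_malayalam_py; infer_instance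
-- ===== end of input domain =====

-- B replaces A's iterated whole-string membership-test-plus-replace loop by a recursion over the
-- key/value pairs (zipped from two '|'-separated tables) that splits on the current key and joins
-- the recursively converted fragments with the Malayalam value (objective: alternative decomposition).

-- ===== PORT A =====
-- the dict literal of A, as an insertion-ordered association list
def pvTableA : List (String × String) :=
  [("namaskaram", "നമസ്കാരം"), ("hai", "ഹായ്"), ("sukham", "സുഖം"),
   ("engane irikkunnu", "എങ്ങനെ ഇരിക്കുന്നു"), ("sahayam", "സഹായം"), ("help", "സഹായം"),
   ("vendam", "വേണം"), ("athe", "അതെ"), ("alla", "അല്ല"), ("sari", "ശരി"),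
   ("undu", "ഉണ്ട്"), ("illa", "ഇല്ല"), ("bill", "ബിൽ"), ("payment", "പേയ്‌മെന്റ്"),
   ("appointment", "അപ്പോയിന്റ്മെന്റ്"), ("technical", "സാങ്കേതിക"), ("transfer", "ട്രാൻസ്ഫർ")]

def convert_to_malayalam_py (text : String) : String :=
  let text_lower := PySem.Str.strip (PySem.Str.lower text)
  pvTableA.foldl
    (fun s kv => if PySem.Str.isIn kv.1 s then PySem.Str.replace s kv.1 kv.2 else s)
    text_lower

-- ===== PORT B =====
-- Source B's keys/values: two '|'-separated strings split at runtime and zipped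
def pvPairsB : List (List Char × List Char) :=
  (PySem.Chars.splitOn "namaskaram|hai|sukham|engane irikkunnu|sahayam|help|vendam|athe|alla|sari|undu|illa|bill|payment|appointment|technical|transfer".toList ['|']).zip
    (PySem.Chars.splitOn "നമസ്കാരം|ഹായ്|സുഖം|എങ്ങനെ ഇരിക്കുന്നു|സഹായം|സഹായം|വേണം|അതെ|അല്ല|ശരി|ഉണ്ട്|ഇല്ല|ബിൽ|പേയ്‌മെന്റ്|അപ്പോയിന്റ്മെന്റ്|സാങ്കേതിക|ട്രാൻസ്ഫർ".toList ['|'])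

-- Source B's `go(pairs, s)`; Python's s.split(key) is ported as PySem.Chars.splitOn,
-- which is exact because every key of the table is a nonempty string.
def pvConvGo : List (List Char × List Char) → List Char → List Char
  | [], s => s
  | (k, v) :: rest, s =>
      PySem.Chars.join v ((PySem.Chars.splitOn s k).map (pvConvGo rest))

def convert_to_malayalam_py_alt (text : String) : String :=
  String.ofList (pvConvGo pvPairsB (PySem.Chars.strip (PySem.Chars.lower text.toList)))

-- ===== PRECONDITION & SPEC =====
def Spec_convert_to_malayalam_py (text : String) (out : String) : Prop := out = convert_to_malayalam_py_alt text
instance (text : String) (out : String) : Decidable (Spec_convert_to_malayalam_py text out) := by unfold Spec_convert_to_malayalam_py; infer_instance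

-- ===== CLAIM (what is proved, stated in full; the proofs are below) =====
def Claim_equal_convert_to_malayalam_py : Prop := ∀ (text : String), Dom_convert_to_malayalam_py text → Spec_convert_to_malayalam_py text (convert_to_malayalam_py text)

-- ===== LEMMAS AND PROOFS =====

-- clean recursive model of PySem.Chars.replace (for nonempty pattern k)
def pvRep (k v : List Char) : List Char → List Char
  | [] => []
  | c :: t =>
      if k.isPrefixOf (c :: t) then v ++ pvRep k v (t.drop (k.length - 1))
      else c :: pvRep k v t
termination_by l => l.length
decreasing_by all_goals simp

-- prepend a chunk onto the first piece
def pvPreL (x : List Char) : List (List Char) → List (List Char)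
  | [] => [x]
  | p :: ps => (x ++ p) :: ps

-- clean recursive model of PySem.Chars.splitOn (for nonempty separator k)
def pvSpl (k : List Char) : List Char → List (List Char)
  | [] => [[]]
  | c :: t =>
      if k.isPrefixOf (c :: t) then [] :: pvSpl k (t.drop (k.length - 1))
      else pvPreL [c] (pvSpl k t)
termination_by l => l.length
decreasing_by all_goals simp

lemma pvRep_pos (k v l : List Char) (hk : k ≠ []) (h : k <+: l) :
    pvRep k v l = v ++ pvRep k v (l.drop k.length) := by
  obtain ⟨m, hm⟩ : ∃ m, k.length = m + 1 := by
    cases k with | nil => exact absurd rfl hk | cons a b => exact ⟨b.length, rfl⟩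
  cases l with
  | nil => simp at h; exact absurd h hk
  | cons c t =>
      rw [pvRep, if_pos (List.isPrefixOf_iff_prefix.mpr h)]
      rw [hm, List.drop_succ_cons]
      simp

lemma pvRep_neg (k v : List Char) (c : Char) (t : List Char) (h : ¬ k <+: (c :: t)) :
    pvRep k v (c :: t) = c :: pvRep k v t := by
  rw [pvRep, if_neg (by simpa [List.isPrefixOf_iff_prefix] using h)]

lemma pvSpl_pos (k l : List Char) (hk : k ≠ []) (h : k <+: l) :
    pvSpl k l = [] :: pvSpl k (l.drop k.length) := by
  obtain ⟨m, hm⟩ : ∃ m, k.length = m + 1 := by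
    cases k with | nil => exact absurd rfl hk | cons a b => exact ⟨b.length, rfl⟩
  cases l with
  | nil => simp at h; exact absurd h hk
  | cons c t =>
      rw [pvSpl, if_pos (List.isPrefixOf_iff_prefix.mpr h)]
      rw [hm, List.drop_succ_cons]
      simp

lemma pvSpl_neg (k : List Char) (c : Char) (t : List Char) (h : ¬ k <+: (c :: t)) :
    pvSpl k (c :: t) = pvPreL [c] (pvSpl k t) := by
  rw [pvSpl, if_neg (by simpa [List.isPrefixOf_iff_prefix] using h)]

lemma pvSpl_ne_nil (k l : List Char) : pvSpl k l ≠ [] := by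
  induction l using pvSpl.induct k with
  | case1 => simp [pvSpl]
  | case2 c t hp ih => rw [pvSpl, if_pos hp]; simp
  | case3 c t hp ih =>
      rw [pvSpl, if_neg hp]
      cases h : pvSpl k t with
      | nil => simp [pvPreL]
      | cons p ps => simp [pvPreL]

lemma pvRep_skip (k v u y : List Char) (hk : k ≠ []) (hd : ∀ c ∈ u, c ∉ k) :
    pvRep k v (u ++ y) = u ++ pvRep k v y := by
  induction u with
  | nil => simp
  | cons c u' ih =>
      have hnp : ¬ k <+: (c :: (u' ++ y)) := by
        intro hp
        cases k with
        | nil => exact hk rfl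
        | cons a b =>
            obtain ⟨t0, ht⟩ := hp
            have hac : a = c := by simpa using congrArg (fun l => l.head?) ht
            exact hd c (List.mem_cons_self) (hac ▸ List.mem_cons_self)
      rw [List.cons_append, pvRep_neg k v c (u' ++ y) hnp, ih (fun c hc => hd c (List.mem_cons_of_mem _ hc))]
      simp

lemma pvPrefix_split (k x v y : List Char) (hv : v ≠ []) (hd : ∀ c ∈ v, c ∉ k)
    (h : k <+: x ++ v ++ y) : k <+: x ∧ k.length ≤ x.length := by
  by_cases hle : k.length ≤ x.length
  · exact ⟨List.prefix_of_prefix_length_le h ((List.prefix_append x (v ++ y)).trans (by rw [List.append_assoc])) hle, hle⟩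
  · exfalso
    have hlt : x.length < k.length := Nat.lt_of_not_le hle
    obtain ⟨d, v', rfl⟩ := List.exists_cons_of_ne_nil hv
    have h1 : (x ++ (d :: v') ++ y)[x.length]? = some d := by
      rw [List.append_assoc, List.getElem?_append_right (le_refl _)]
      simp
    have h2 : k[x.length]? = some d := by
      obtain ⟨t0, ht⟩ := h
      rw [← ht, List.getElem?_append_left hlt] at h1
      exact h1

    have : d ∈ k := List.mem_of_getElem? h2
    exact hd d List.mem_cons_self this


lemma pvIntercalate_cons (v p : List Char) (ps : List (List Char)) (h : ps ≠ []) :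
    List.intercalate v (p :: ps) = p ++ v ++ List.intercalate v ps := by
  obtain ⟨q, qs, rfl⟩ := List.exists_cons_of_ne_nil h
  simp [List.intercalate, List.intersperse]

lemma pvRep_append (k w v : List Char) (hk : k ≠ []) (hv : v ≠ []) (hd : ∀ c ∈ v, c ∉ k) :
    ∀ x y, pvRep k w (x ++ v ++ y) = pvRep k w x ++ v ++ pvRep k w y := by
  have main : ∀ n (x y : List Char), x.length ≤ n →
      pvRep k w (x ++ v ++ y) = pvRep k w x ++ v ++ pvRep k w y := by
    intro n
    induction n with
    | zero =>
        intro x y hx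
        have : x = [] := List.length_eq_zero_iff.mp (Nat.le_zero.mp hx)
        subst this
        simp [pvRep_skip k w v y hk hd, pvRep]
    | succ m ih =>
        intro x y hx
        cases x with
        | nil => simp [pvRep_skip k w v y hk hd, pvRep]
        | cons c t =>
            by_cases hp : k <+: (c :: t) ++ v ++ y
            · obtain ⟨hpx, hlen⟩ := pvPrefix_split k (c :: t) v y hv hd hp
              obtain ⟨m1, hm1⟩ : ∃ m1, k.length = m1 + 1 := by
                cases k with | nil => exact absurd rfl hk | cons a b => exact ⟨b.length, rfl⟩
              rw [pvRep_pos k w _ hk hp, pvRep_pos k w _ hk hpx]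
              rw [List.append_assoc, List.drop_append_of_le_length hlen, ← List.append_assoc]
              rw [ih (List.drop k.length (c :: t)) y (by simp at hx ⊢; omega)]
              simp
            · have hnpx : ¬ k <+: (c :: t) := fun hc =>
                hp (by simpa [List.append_assoc] using hc.trans (List.prefix_append (c :: t) (v ++ y)))
              have e1 : (c :: t) ++ v ++ y = c :: (t ++ v ++ y) := by simp
              have hnp2 : ¬ k <+: c :: (t ++ v ++ y) := by rw [← e1]; exact hp
              rw [e1, pvRep_neg k w c _ hnp2, pvRep_neg k w c t hnpx]
              rw [ih t y (by simpa using Nat.lt_succ_iff.mp (by simpa using hx))]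
              simp
  exact fun x y => main x.length x y (le_refl _)

lemma pvRep_eq_intercalate (k v : List Char) (hk : k ≠ []) :
    ∀ l, pvRep k v l = List.intercalate v (pvSpl k l) := by
  have main : ∀ n (l : List Char), l.length ≤ n →
      pvRep k v l = List.intercalate v (pvSpl k l) := by
    intro n
    induction n with
    | zero =>
        intro l hl
        have : l = [] := List.length_eq_zero_iff.mp (Nat.le_zero.mp hl)
        subst this
        simp [pvRep, pvSpl, List.intercalate]
    | succ m ih =>
        intro l hl
        cases l with
        | nil => simp [pvRep, pvSpl, List.intercalate]
        | cons c t =>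
            by_cases hp : k <+: (c :: t)
            · obtain ⟨m1, hm1⟩ : ∃ m1, k.length = m1 + 1 := by
                cases k with | nil => exact absurd rfl hk | cons a b => exact ⟨b.length, rfl⟩
              rw [pvRep_pos k v _ hk hp, pvSpl_pos k _ hk hp]
              rw [pvIntercalate_cons v [] _ (pvSpl_ne_nil k _)]
              rw [ih _ (by simp at hl ⊢; omega)]
              simp
            · rw [pvRep_neg k v c t hp, pvSpl_neg k c t hp]
              rw [ih t (by simpa using hl)]
              cases hsp : pvSpl k t with
              | nil => exact absurd hsp (pvSpl_ne_nil k t)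
              | cons p ps =>
                  cases ps with
                  | nil => simp [pvPreL, List.intercalate]
                  | cons q qs =>
                      rw [pvPreL, pvIntercalate_cons v ([c] ++ p) (q :: qs) (by simp),
                          pvIntercalate_cons v p (q :: qs) (by simp)]
                      simp
  exact fun l => main l.length l (le_refl _)

lemma pvRep_not_in (k v l : List Char) (h : ¬ k <:+: l) : pvRep k v l = l := by
  induction l with
  | nil => simp [pvRep]
  | cons c t ih =>
      rw [List.infix_cons_iff] at h
      push Not at h
      rw [pvRep_neg k v c t h.1, ih h.2]

def pvOK (items : List (List Char × List Char)) : Prop :=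
  (∀ p ∈ items, p.1 ≠ [] ∧ p.2 ≠ []) ∧ items.Pairwise (fun a b => ∀ c ∈ a.2, c ∉ b.1)

def pvR (items : List (List Char × List Char)) (s : List Char) : List Char :=
  items.foldl (fun s p => pvRep p.1 p.2 s) s

lemma pvR_append (items : List (List Char × List Char)) (hkeys : ∀ p ∈ items, p.1 ≠ [])
    (v : List Char) (hv : v ≠ []) (hdisj : ∀ c ∈ v, ∀ p ∈ items, c ∉ p.1) :
    ∀ x y, pvR items (x ++ v ++ y) = pvR items x ++ v ++ pvR items y := by
  induction items with
  | nil => intro x y; simp [pvR]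
  | cons p rest ih =>
      intro x y
      have hk : p.1 ≠ [] := hkeys p (List.mem_cons_self)
      have hd : ∀ c ∈ v, c ∉ p.1 := fun c hc => hdisj c hc p (List.mem_cons_self)
      simp only [pvR, List.foldl_cons]
      rw [pvRep_append p.1 p.2 v hk hv hd x y]
      exact ih (fun q hq => hkeys q (List.mem_cons_of_mem _ hq))
        (fun c hc q hq => hdisj c hc q (List.mem_cons_of_mem _ hq))
        (pvRep p.1 p.2 x) (pvRep p.1 p.2 y)

lemma pvR_intercalate (items : List (List Char × List Char)) (hkeys : ∀ p ∈ items, p.1 ≠ [])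
    (v : List Char) (hv : v ≠ []) (hdisj : ∀ c ∈ v, ∀ p ∈ items, c ∉ p.1) :
    ∀ ps, ps ≠ [] → pvR items (List.intercalate v ps) = List.intercalate v (ps.map (pvR items)) := by
  intro ps
  induction ps with
  | nil => intro h; exact absurd rfl h
  | cons p ps ih =>
      intro _
      cases ps with
      | nil => simp [List.intercalate]
      | cons q qs =>
          rw [pvIntercalate_cons v p (q :: qs) (by simp),
              pvR_append items hkeys v hv hdisj p (List.intercalate v (q :: qs)),
              ih (by simp)]
          conv_rhs => rw [List.map_cons, pvIntercalate_cons v (pvR items p) ((q :: qs).map (pvR items)) (by simp)]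

lemma pvRepGo_eq (k v : List Char) (hk : k ≠ []) :
    ∀ n (l acc : List Char), l.length ≤ n →
      PySem.Chars.replace.go k v n l acc = acc.reverse ++ pvRep k v l := by
  intro n
  induction n using Nat.strong_induction_on with
  | _ n ih =>
      intro l acc hl
      cases l with
      | nil =>
          cases n with
          | zero => rw [PySem.Chars.replace.go]; simp [pvRep]
          | succ m => rw [PySem.Chars.replace.go]; simp [pvRep]; omega
      | cons c t =>
          obtain ⟨m1, hm1⟩ : ∃ m1, k.length = m1 + 1 := by
            cases k with | nil => exact absurd rfl hk | cons a b => exact ⟨b.length, rfl⟩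
          cases n with
          | zero => simp at hl
          | succ m =>
              rw [PySem.Chars.replace.go]
              by_cases hp : k.isPrefixOf (c :: t)
              · simp only [hp, if_true]
                have hpp : k <+: (c :: t) := List.isPrefixOf_iff_prefix.mp hp
                have hlen : (List.drop k.length (c :: t)).length ≤ m := by
                  simp at hl ⊢; omega
                rw [ih m (Nat.lt_succ_self m) _ _ hlen]
                rw [pvRep_pos k v (c :: t) hk hpp]
                simp
              · simp only [hp, if_false, Bool.false_eq_true]
                have hnp : ¬ k <+: (c :: t) := fun h => hp (List.isPrefixOf_iff_prefix.mpr h)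
                rw [ih m (Nat.lt_succ_self m) t (c :: acc) (by simp at hl ⊢; omega)]
                rw [pvRep_neg k v c t hnp]
                simp

lemma pvReplace_eq (k v l : List Char) (hk : k ≠ []) :
    PySem.Chars.replace l k v = pvRep k v l := by
  rw [PySem.Chars.replace]
  rw [if_neg (by simp [hk])]
  simpa using pvRepGo_eq k v hk l.length l [] (le_refl _)

lemma pvPreL_append (a b : List Char) (ps : List (List Char)) :
    pvPreL a (pvPreL b ps) = pvPreL (a ++ b) ps := by
  cases ps <;> simp [pvPreL]

lemma pvSplGo_eq (k : List Char) (hk : k ≠ []) :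
    ∀ n (l cur : List Char) (acc : List (List Char)), l.length < n →
      PySem.Chars.splitOn.go k n l cur acc = acc.reverse ++ pvPreL cur.reverse (pvSpl k l) := by
  intro n
  induction n using Nat.strong_induction_on with
  | _ n ih =>
      intro l cur acc hl
      cases l with
      | nil =>
          cases n with
          | zero => simp at hl
          | succ m => rw [PySem.Chars.splitOn.go]; simp [pvSpl, pvPreL]; omega
      | cons c t =>
          obtain ⟨m1, hm1⟩ : ∃ m1, k.length = m1 + 1 := by
            cases k with | nil => exact absurd rfl hk | cons a b => exact ⟨b.length, rfl⟩
          cases n with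
          | zero => simp at hl
          | succ m =>
              rw [PySem.Chars.splitOn.go]
              by_cases hp : k.isPrefixOf (c :: t)
              · simp only [hp, if_true]
                have hpp : k <+: (c :: t) := List.isPrefixOf_iff_prefix.mp hp
                have hlen : (List.drop k.length (c :: t)).length < m := by
                  simp at hl ⊢; omega
                rw [ih m (Nat.lt_succ_self m) _ _ _ hlen]
                rw [pvSpl_pos k (c :: t) hk hpp]
                cases hsp : pvSpl k (List.drop k.length (c :: t)) with
                | nil => exact absurd hsp (pvSpl_ne_nil k _)
                | cons p ps => simp [pvPreL]
              · simp only [hp, if_false, Bool.false_eq_true]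
                have hnp : ¬ k <+: (c :: t) := fun h => hp (List.isPrefixOf_iff_prefix.mpr h)
                rw [ih m (Nat.lt_succ_self m) t (c :: cur) acc (by simp at hl ⊢; omega)]
                rw [pvSpl_neg k c t hnp]
                rw [pvPreL_append cur.reverse [c] (pvSpl k t)]
                simp

lemma pvSplitOn_eq (k l : List Char) (hk : k ≠ []) :
    PySem.Chars.splitOn l k = pvSpl k l := by
  rw [PySem.Chars.splitOn]
  rw [pvSplGo_eq k hk (l.length + 1) l [] [] (Nat.lt_succ_self _)]
  cases hsp : pvSpl k l with
  | nil => exact absurd hsp (pvSpl_ne_nil k l)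
  | cons p ps => simp [pvPreL]

lemma pvConvGo_eq_pvR (items : List (List Char × List Char)) (hok : pvOK items) :
    ∀ s, pvConvGo items s = pvR items s := by
  induction items with
  | nil => intro s; simp [pvConvGo, pvR]
  | cons kv rest ih =>
      intro s
      obtain ⟨k, v⟩ := kv
      obtain ⟨hne, hpw⟩ := hok
      rw [List.pairwise_cons] at hpw
      have hk : k ≠ [] := (hne (k, v) (by simp)).1
      have hv : v ≠ [] := (hne (k, v) (by simp)).2
      have hrestne : ∀ p ∈ rest, p.1 ≠ [] := fun q hq =>
        (hne q (List.mem_cons_of_mem _ hq)).1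
      have hrest : pvOK rest :=
        ⟨fun q hq => hne q (List.mem_cons_of_mem _ hq), hpw.2⟩
      have hdisj : ∀ c ∈ v, ∀ p ∈ rest, c ∉ p.1 :=
        fun c hc q hq => hpw.1 q hq c hc
      show PySem.Chars.join v ((PySem.Chars.splitOn s k).map (pvConvGo rest)) = _
      rw [PySem.Chars.join, pvSplitOn_eq k s hk,
          List.map_congr_left (fun x _ => ih hrest x),
          ← pvR_intercalate rest hrestne v hv hdisj (pvSpl k s) (pvSpl_ne_nil _ _),
          ← pvRep_eq_intercalate k v hk s]
      simp [pvR]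

lemma pvFoldA_eq_pvR (items : List (String × String))
    (hok : pvOK (items.map (fun p => (p.1.toList, p.2.toList)))) :
    ∀ cs : List Char,
      items.foldl (fun s kv => if PySem.Str.isIn kv.1 s then PySem.Str.replace s kv.1 kv.2 else s)
        (String.ofList cs)
      = String.ofList (pvR (items.map (fun p => (p.1.toList, p.2.toList))) cs) := by
  induction items with
  | nil => intro cs; simp [pvR]
  | cons kv rest ih =>
      intro cs
      obtain ⟨k, v⟩ := kv
      obtain ⟨hne, hpw⟩ := hok
      rw [List.map_cons, List.pairwise_cons] at hpw
      have hk : k.toList ≠ [] := (hne (k.toList, v.toList) (by simp)).1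
      have hrest : pvOK (rest.map (fun p => (p.1.toList, p.2.toList))) :=
        ⟨fun q hq => hne q (by simp at hq ⊢; tauto), hpw.2⟩
      have hstep : (if PySem.Str.isIn k (String.ofList cs)
            then PySem.Str.replace (String.ofList cs) k v else String.ofList cs)
          = String.ofList (pvRep k.toList v.toList cs) := by
        by_cases hin : PySem.Chars.isIn k.toList cs = true
        · rw [if_pos (by simp [PySem.Str.isIn_eq, hin])]
          rw [PySem.Str.replace]
          rw [String.toList_ofList, pvReplace_eq k.toList v.toList cs hk]
        · rw [if_neg (by simp [PySem.Str.isIn_eq]; simpa using hin)]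
          rw [pvRep_not_in k.toList v.toList cs
            (by simpa using (PySem.Chars.isIn_eq_false_iff k.toList cs).mp (by simpa using hin))]
      rw [List.foldl_cons]
      show List.foldl _ (if PySem.Str.isIn k (String.ofList cs) = true
          then PySem.Str.replace (String.ofList cs) k v else String.ofList cs) rest = _
      rw [hstep, ih hrest]
      simp [pvR]

set_option maxRecDepth 20000 in
lemma pvPairsB_eq : pvPairsB = pvTableA.map (fun p => (p.1.toList, p.2.toList)) := by
  decide

lemma pvTable_ok : pvOK (pvTableA.map (fun p => (p.1.toList, p.2.toList))) := by
  constructor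
  · intro p hp
    simp only [pvTableA, List.map_cons, List.map_nil, List.mem_cons, List.not_mem_nil, or_false] at hp
    rcases hp with rfl|rfl|rfl|rfl|rfl|rfl|rfl|rfl|rfl|rfl|rfl|rfl|rfl|rfl|rfl|rfl|rfl <;>
      exact ⟨by simp, by simp⟩
  · simp [pvTableA, List.pairwise_cons]

-- ===== VERDICT (by name: the statement is the Claim_ definition above) =====
theorem convert_to_malayalam_py_spec : Claim_equal_convert_to_malayalam_py := by
  intro text _
  unfold Spec_convert_to_malayalam_py convert_to_malayalam_py convert_to_malayalam_py_alt
  have hstrip : PySem.Str.strip (PySem.Str.lower text)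
      = String.ofList (PySem.Chars.strip (PySem.Chars.lower text.toList)) := by
    simp [PySem.Str.strip, PySem.Str.lower]
  rw [hstrip, pvFoldA_eq_pvR pvTableA pvTable_ok, pvPairsB_eq,
      pvConvGo_eq_pvR _ pvTable_ok]
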